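-- pv_equiv track=rewrite | github.com/xznhj8129/uav_protocol_experiments | low_level_protocol/test_protocol.py | encode_address
-- ===== SOURCE A (Python) =====
-- def encode_address(segments: tuple, schema: list) -> int:
--     """
--     Encode a tuple of address segments into an integer,
--     according to the provided schema (a list of bit lengths that sum to 16/20).
--     """
--     if len(segments) != len(schema):
--         raise ValueError("Number of segments does not match the schema length.")
--     if (len(schema) > 1 and sum(schema) != 16) or (len(schema) == 1 and sum(schema) != 20):
--         raise ValueError("Address space overflow")
--
--     result = 0
--     shift = 20 if len(schema) == 1 else 16
--     for seg, bits in zip(segments, schema):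
--         shift -= bits
--         if seg >= (1 << bits):
--             raise ValueError(f"Segment value {seg} too high for allocated {bits} bits.")
--         result |= (seg & ((1 << bits) - 1)) << shift
--     return result
-- ===== SOURCE B (Python) =====
-- def encode_address(segments: tuple, schema: list) -> int:
--     """
--     Encode address segments by place-value arithmetic: validate everything
--     up front, compute each field's positional weight (the product of the
--     2**bits sizes of all later fields) in one backward scan, then return
--     the sum of the weighted masked fields.
--     """
--     if len(segments) != len(schema):
--         raise ValueError("Number of segments does not match the schema length.")
--     if (len(schema) > 1 and sum(schema) != 16) or (len(schema) == 1 and sum(schema) != 20):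
--         raise ValueError("Address space overflow")
--     for seg, bits in zip(segments, schema):
--         if seg >= (1 << bits):
--             raise ValueError(f"Segment value {seg} too high for allocated {bits} bits.")
--
--     weights = []
--     w = 1
--     for bits in reversed(schema):
--         weights.append(w)
--         w *= 1 << bits
--     weights.reverse()
--
--     return sum((seg & ((1 << bits) - 1)) * w
--                for seg, bits, w in zip(segments, schema, weights))
-- ===== Notes on version B (the rewrite author's own statement) =====
-- stated objective: alternative
-- what changed: B replaces A's single stateful shift-and-OR packing loop by staged passes: validate all segments first, build each field's positional weight (product of the sizes of all later fields) in one backward scan, then return the plain arithmetic sum of the weighted masked fields -- no shift variable, no OR accumulator.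
import Mathlib
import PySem

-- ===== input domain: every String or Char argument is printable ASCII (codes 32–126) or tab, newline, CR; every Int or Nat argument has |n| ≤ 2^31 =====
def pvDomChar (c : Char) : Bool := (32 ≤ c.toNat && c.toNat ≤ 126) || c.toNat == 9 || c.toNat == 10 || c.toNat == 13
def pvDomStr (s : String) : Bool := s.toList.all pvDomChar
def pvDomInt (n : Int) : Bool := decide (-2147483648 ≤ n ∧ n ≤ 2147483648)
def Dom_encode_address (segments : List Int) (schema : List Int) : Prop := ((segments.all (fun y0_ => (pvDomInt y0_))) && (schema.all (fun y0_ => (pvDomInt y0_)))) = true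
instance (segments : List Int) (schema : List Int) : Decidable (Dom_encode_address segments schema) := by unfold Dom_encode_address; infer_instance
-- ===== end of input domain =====

-- B packs the address by place-value arithmetic (staged validation, a backward scan
-- building positional weights, then a weighted sum) instead of A's shift-and-OR loop.

-- ===== PORT A =====
-- A's raises (length mismatch, bad bit-length sum, negative bit length, oversized
-- segment) are excluded by Pre_encode_address; the port computes the normal path.
def encode_address (segments : List Int) (schema : List Int) : Int :=
  ((segments.zip schema).foldl
      (fun (st : Int × Int) (p : Int × Int) =>
        let shift := st.2 - p.2
        (PySem.Int.bor st.1
          ((PySem.Int.band p.1 ((1 <<< p.2.toNat) - 1)) <<< shift.toNat), shift))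
      (0, if schema.length = 1 then 20 else 16)).1

-- ===== PORT B =====
-- the validation passes of Source B only raise (excluded by Pre_); the port computes
-- the weights pass (backward scan, then reverse) and the weighted sum, as Source B does
def encode_address_alt (segments : List Int) (schema : List Int) : Int :=
  let ws := schema.reverse.foldl
      (fun (st : List Int × Int) (bits : Int) =>
        (st.1 ++ [st.2], st.2 * (1 <<< bits.toNat)))
      (([] : List Int), (1 : Int))
  let weights := ws.1.reverse
  ((segments.zip (schema.zip weights)).map
      (fun p => (PySem.Int.band p.1 ((1 <<< p.2.1.toNat) - 1)) * p.2.2)).sum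

-- ===== PRECONDITION & SPEC =====
-- Pre_ admits exactly the inputs where the Python A returns normally: equal lengths,
-- the 16/20 bit-sum rule, and every segment nonnegative-width and below 2^bits
-- (otherwise A raises ValueError, also on a negative shift count).
def Pre_encode_address (segments : List Int) (schema : List Int) : Prop :=
  segments.length = schema.length ∧
  (schema.length > 1 → schema.sum = 16) ∧
  (schema.length = 1 → schema.sum = 20) ∧
  ∀ p ∈ segments.zip schema, 0 ≤ p.2 ∧ p.1 < 1 <<< p.2.toNat
instance (segments : List Int) (schema : List Int) : Decidable (Pre_encode_address segments schema) := by unfold Pre_encode_address; infer_instance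
def pvWitness_encode_address : List Int × List Int := ([3, 200], [8, 8])
def Spec_encode_address (segments : List Int) (schema : List Int) (out : Int) : Prop := out = encode_address_alt segments schema
instance (segments : List Int) (schema : List Int) (out : Int) : Decidable (Spec_encode_address segments schema out) := by unfold Spec_encode_address; infer_instance

-- ===== CLAIM (what is proved, stated in full; the proofs are below) =====
def Claim_equal_encode_address : Prop := ∀ (segments : List Int) (schema : List Int), Dom_encode_address segments schema → Pre_encode_address segments schema → Spec_encode_address segments schema (encode_address segments schema)

-- ===== LEMMAS AND PROOFS =====

-- total bit width of a pair list, as a Nat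
def pvW (l : List (Int × Int)) : Nat := (l.map (fun p => p.2.toNat)).sum

-- total bit width of a schema list, as a Nat
def pvWn (l : List Int) : Nat := (l.map Int.toNat).sum

-- masked segment value, as a Nat
def pvM (p : Int × Int) : Nat := (PySem.Int.band p.1 ((1 <<< p.2.toNat) - 1)).toNat

-- the packed value A's loop computes (OR of shifted fields)
def pvV : List (Int × Int) → Nat
  | [] => 0
  | p :: t => (pvM p) <<< pvW t ||| pvV t

-- the packed value B computes (sum of place-weighted fields)
def pvS : List (Int × Int) → Nat
  | [] => 0
  | p :: t => pvM p * 2 ^ pvW t + pvS t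

-- the weights list Source B's backward scan builds, front-to-back from seed w
def pvPW : List Int → Int → List Int
  | [], _ => []
  | b :: t, w => w :: pvPW t (w * ((2 ^ b.toNat : Nat) : Int))

-- the weights after the final reverse: weight of a field = 2^(width of later fields)
def pvSW : List Int → List Int
  | [] => []
  | _ :: t => ((2 ^ pvWn t : Nat) : Int) :: pvSW t

lemma pvM_nonneg (p : Int × Int) : 0 ≤ PySem.Int.band p.1 ((1 <<< p.2.toNat) - 1) := by
  rw [PySem.Int.band_comm]
  refine PySem.Int.band_nonneg_of_nonneg_left _ ?_
  have h : (1 : Nat) ≤ 1 <<< p.2.toNat := by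
    rw [Nat.one_shiftLeft]; exact Nat.one_le_two_pow
  omega

lemma pvM_cast (p : Int × Int) :
    (↑(pvM p) : Int) = PySem.Int.band p.1 ((1 <<< p.2.toNat) - 1) :=
  Int.toNat_of_nonneg (pvM_nonneg p)

lemma pvM_lt (p : Int × Int) : pvM p < 2 ^ p.2.toNat := by
  have hone : (1 : Nat) ≤ 2 ^ p.2.toNat := Nat.one_le_two_pow
  unfold pvM PySem.Int.band
  rw [Nat.one_shiftLeft]
  split_ifs with h1 h2 h2
  · have := Nat.and_le_right (n := p.1.toNat) (m := (((2 ^ p.2.toNat : Nat) : Int) - 1).toNat)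
    omega
  · omega
  · have := Nat.sub_le ((((2 ^ p.2.toNat : Nat) : Int) - 1).toNat)
      (((((2 ^ p.2.toNat : Nat) : Int) - 1).toNat) &&& (-p.1 - 1).toNat)
    omega
  · omega

lemma pvW_cast (l : List (Int × Int)) (hb : ∀ p ∈ l, 0 ≤ p.2) :
    ((pvW l : Int)) = (l.map Prod.snd).sum := by
  induction l with
  | nil => simp [pvW]
  | cons p t ih =>
    have h1 : (↑p.2.toNat : Int) = p.2 := Int.toNat_of_nonneg (hb p (by simp))
    simp only [pvW, List.map_cons, List.sum_cons] at *
    rw [Nat.cast_add, h1, ih (fun q hq => hb q (by simp [hq]))]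

lemma pvZipSnd {α β : Type} (l1 : List α) (l2 : List β) (h : l1.length = l2.length) :
    (l1.zip l2).map Prod.snd = l2 := by
  induction l1 generalizing l2 with
  | nil => cases l2 with | nil => simp | cons b t2 => simp at h
  | cons a t1 ih =>
    cases l2 with
    | nil => simp at h
    | cons b t2 =>
      simp only [List.length_cons, Nat.add_right_cancel_iff] at h
      simp [ih t2 h]

-- the zip's bit width is the schema tail's bit width (equal lengths)
lemma pvW_eq_pvWn (l1 : List Int) (l2 : List Int) (h : l1.length = l2.length) :
    pvW (l1.zip l2) = pvWn l2 := by
  unfold pvW pvWn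
  conv_rhs => rw [← pvZipSnd l1 l2 h]
  rw [List.map_map]
  rfl

-- A's loop: starting from accumulator ↑R and shift ↑(pvW l), it ORs in pvV l.
lemma pvA_loop (l : List (Int × Int)) (R : Nat) (hb : ∀ p ∈ l, 0 ≤ p.2) :
    (l.foldl
      (fun (st : Int × Int) (p : Int × Int) =>
        let shift := st.2 - p.2
        (PySem.Int.bor st.1
          ((PySem.Int.band p.1 ((1 <<< p.2.toNat) - 1)) <<< shift.toNat), shift))
      ((R : Int), ((pvW l : Nat) : Int))).1 = ↑(R ||| pvV l) := by
  induction l generalizing R with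
  | nil => simp [pvV]
  | cons p t ih =>
    have hp : (↑p.2.toNat : Int) = p.2 := Int.toNat_of_nonneg (hb p (by simp))
    have hshift : ((pvW (p :: t) : Nat) : Int) - p.2 = ((pvW t : Nat) : Int) := by
      simp only [pvW, List.map_cons, List.sum_cons]
      push_cast
      rw [hp]; ring
    have hmask : PySem.Int.bor (↑R)
        ((PySem.Int.band p.1 ((1 <<< p.2.toNat) - 1)) <<< pvW t)
        = ↑(R ||| pvM p <<< pvW t) := by
      rw [← pvM_cast p]
      have : ((pvM p : Nat) : Int) <<< pvW t = ↑((pvM p) <<< pvW t) := by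
        exact_mod_cast rfl
      rw [this, PySem.Int.bor_natCast]
    simp only [List.foldl_cons, hshift, Int.toNat_natCast, hmask]
    rw [ih (R ||| pvM p <<< pvW t) (fun q hq => hb q (by simp [hq]))]
    simp [pvV, Nat.or_assoc]

-- the OR-packing and the sum-packing agree: fields are disjoint (each masked
-- value is below its field size, the tail below its total width)
lemma pvS_lt (l : List (Int × Int)) : pvS l < 2 ^ pvW l := by
  induction l with
  | nil => simp [pvS, pvW]
  | cons p t ih =>
    have h1 := pvM_lt p
    have hW : pvW (p :: t) = p.2.toNat + pvW t := by simp [pvW]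
    have hpow : 2 ^ pvW (p :: t) = 2 ^ p.2.toNat * 2 ^ pvW t := by
      rw [hW, pow_add]
    simp only [pvS, hpow]
    nlinarith [pow_pos (by norm_num : (0:Nat) < 2) (pvW t)]

lemma pvV_eq_pvS (l : List (Int × Int)) : pvV l = pvS l := by
  induction l with
  | nil => rfl
  | cons p t ih =>
    have hlt : pvS t < 2 ^ pvW t := pvS_lt t
    simp only [pvV, pvS, ih]
    rw [← Nat.shiftLeft_add_eq_or_of_lt hlt, Nat.shiftLeft_eq]

-- Source B's backward weights scan, characterised: it appends pvPW and multiplies up the width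
lemma pvFoldPW (l : List Int) (A0 : List Int) (w0 : Int) :
    l.foldl
      (fun (st : List Int × Int) (bits : Int) =>
        (st.1 ++ [st.2], st.2 * (1 <<< bits.toNat)))
      (A0, w0)
      = (A0 ++ pvPW l w0, w0 * ((2 ^ pvWn l : Nat) : Int)) := by
  induction l generalizing A0 w0 with
  | nil => simp [pvPW, pvWn]
  | cons b t ih =>
    have hW : pvWn (b :: t) = b.toNat + pvWn t := by simp [pvWn]
    rw [List.foldl_cons, ih, Nat.one_shiftLeft]
    refine Prod.ext ?_ ?_
    · simp [pvPW]
    · simp only [hW]; push_cast [pow_add]; ring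

lemma pvPW_append (x y : List Int) (w : Int) :
    pvPW (x ++ y) w = pvPW x w ++ pvPW y (w * ((2 ^ pvWn x : Nat) : Int)) := by
  induction x generalizing w with
  | nil => simp [pvPW, pvWn]
  | cons b t ih =>
    have hW : pvWn (b :: t) = b.toNat + pvWn t := by simp [pvWn]
    simp only [List.cons_append, pvPW, ih, hW]
    congr 3
    push_cast [pow_add]; ring

lemma pvWn_reverse (l : List Int) : pvWn l.reverse = pvWn l := by
  unfold pvWn
  rw [List.map_reverse, List.sum_reverse]

-- reversing the scan's output yields the suffix weights
lemma pvPW_reverse (l : List Int) : pvPW l.reverse 1 = (pvSW l).reverse := by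
  induction l with
  | nil => rfl
  | cons b t ih =>
    rw [List.reverse_cons, pvPW_append, ih, pvWn_reverse]
    simp [pvPW, pvSW]

-- B's weighted sum equals the sum-packing of the zipped list
lemma pvSum_eq_pvS (segs sch : List Int) (h : segs.length = sch.length) :
    ((segs.zip (sch.zip (pvSW sch))).map
        (fun p => (PySem.Int.band p.1 ((1 <<< p.2.1.toNat) - 1)) * p.2.2)).sum
      = ((pvS (segs.zip sch) : Nat) : Int) := by
  induction segs generalizing sch with
  | nil => simp [pvS]
  | cons a t1 ih =>
    cases sch with
    | nil => simp at h
    | cons b t2 =>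
      simp only [List.length_cons, Nat.add_right_cancel_iff] at h
      have hc := pvM_cast (a, b)
      simp only at hc
      simp only [pvSW, List.zip_cons_cons, List.map_cons, List.sum_cons, pvS,
        ih t2 h]
      rw [pvW_eq_pvWn t1 t2 h, ← hc]
      push_cast
      ring

-- ===== VERDICT (by name: the statement is the Claim_ definition above) =====
theorem encode_address_spec : Claim_equal_encode_address := by
  intro segments schema _ hpre
  obtain ⟨hlen, h16, h20, hseg⟩ := hpre
  unfold Spec_encode_address encode_address encode_address_alt
  have hb : ∀ p ∈ segments.zip schema, 0 ≤ p.2 := fun p hp => (hseg p hp).1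
  rw [pvFoldPW]
  simp only [List.nil_append, pvPW_reverse, List.reverse_reverse]
  rw [pvSum_eq_pvS segments schema hlen, ← pvV_eq_pvS]
  cases hschema : schema with
  | nil =>
    subst hschema
    have : segments = [] := by simpa using hlen
    subst this
    simp [pvV]
  | cons b t =>
    have hsum : ((pvW (segments.zip schema) : Nat) : Int) = schema.sum := by
      rw [pvW_cast _ hb, pvZipSnd segments schema hlen]
    have hinit : (if schema.length = 1 then (20 : Int) else 16)
        = ((pvW (segments.zip schema) : Nat) : Int) := by
      rw [hsum]
      by_cases h1 : schema.length = 1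
      · simp [h1, h20 h1]
      · have h0 : schema.length ≠ 0 := by rw [hschema]; simp
        have : schema.length > 1 := by omega
        simp [h1, h16 this]
    rw [← hschema, hinit]
    have hA := pvA_loop (segments.zip schema) 0 hb
    simp only [Nat.cast_zero] at hA
    rw [hA]
    simp
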